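-- pv_equiv track=rewrite | github.com/westreed/ProgrammersAlgorithm | Programmers/Level3/표현 가능한 이진트리.py | solution
-- ===== SOURCE A (Python) =====
-- def solution(numbers):
--     from collections import deque
--     testcase = len(numbers)
--     answer = [1] * testcase
--
--     tree = [1, 3, 7, 15, 31, 63]
--     treeProb = [-1] * 51
--     probIdx, treeIdx = 1, 0
--     while probIdx < 51:
--         if tree[treeIdx] < probIdx: treeIdx += 1
--         treeProb[probIdx] = tree[treeIdx]
--         probIdx += 1
--
--     for tc in range(testcase):
--         number = numbers[tc]
--         _num = bin(number)[2:]
--         _len = len(_num)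
--         # 현재 이진길이에 따라, 만들어야하는 포화이진트리의 갯수
--         size = treeProb[_len]
--         center = size // 2 + 1
--         # 'b'를 붙이는건, center 기준으로 값 계산을 편하게 하기 위해 임의로 추가함
--         _num = 'b' + '0'*(size-_len) + _num
--
--         # 루트가 0이면, 전부 0이어야 하므로 불가능하다.
--         if _num[center] == '0':
--             answer[tc] = 0
--             continue
--
--         Queue = deque([(center, center//2, False)])
--         while Queue:
--             root, length, zero = Queue.popleft()
--
--             if zero and _num[root] == "1":
--                 answer[tc] = 0
--                 break
--             elif _num[root] == "0":
--                 zero = True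
--
--             # 홀수는 단말노드이므로, 더이상 내려갈 수 없음
--             if root % 2 == 1: continue
--
--             _length = length // 2
--             Queue.append((root-length, _length, zero))
--             Queue.append((root+length, _length, zero))
--     return answer
-- ===== SOURCE B (Python) =====
-- def solution(numbers):
--     # Divide-and-conquer validity check on the padded inorder string (no queue, no lookup table).
--     def check(t):
--         if not t:
--             return True
--         mid = len(t) // 2
--         if t[mid] == '0':
--             return '1' not in t
--         return check(t[:mid]) and check(t[mid + 1:])
--
--     answer = []
--     for number in numbers:
--         s = bin(number)[2:]
--         size = 1
--         while size < len(s):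
--             size = 2 * size + 1
--         t = '0' * (size - len(s)) + s
--         mid = size // 2
--         if t[mid] == '0':
--             answer.append(0)
--         else:
--             answer.append(1 if check(t[:mid]) and check(t[mid + 1:]) else 0)
--     return answer
-- ===== Notes on version B (the rewrite author's own statement) =====
-- stated objective: simpler
-- what changed: Replaces A's per-call 51-entry lookup table and deque BFS over index tuples with a zero-flag by a doubling loop for the padded size and a short divide-and-conquer recursion on the padded string (root at the middle, recurse on the two halves, an all-zero scan under a zero root).
import Mathlib
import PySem

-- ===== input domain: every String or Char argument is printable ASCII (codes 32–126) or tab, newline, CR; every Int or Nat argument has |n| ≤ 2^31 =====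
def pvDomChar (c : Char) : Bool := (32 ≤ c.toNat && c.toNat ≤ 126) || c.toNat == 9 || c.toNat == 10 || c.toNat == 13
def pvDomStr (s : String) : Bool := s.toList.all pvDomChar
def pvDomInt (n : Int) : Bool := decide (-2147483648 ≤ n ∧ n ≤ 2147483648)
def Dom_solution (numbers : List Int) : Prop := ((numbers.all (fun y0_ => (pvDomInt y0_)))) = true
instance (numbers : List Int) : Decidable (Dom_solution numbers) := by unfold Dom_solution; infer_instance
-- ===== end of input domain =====

-- B replaces A's per-call 51-entry lookup table and deque BFS by a doubling loop for the
-- padded size and divide-and-conquer recursion on the padded string (objective: simpler).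

-- shared model of Python's bin(n)[2:] (for n < 0 this is 'b' followed by the digits of -n,
-- exactly as bin(-5)[2:] = 'b101'); exact for every Int
def pyBinDigits (m : Nat) : List Char :=
  if h : m = 0 then [] else pyBinDigits (m / 2) ++ [if m % 2 = 1 then '1' else '0']
termination_by m
decreasing_by exact Nat.div_lt_self (Nat.pos_of_ne_zero h) (by norm_num)

def pyBin (n : Int) : List Char :=
  if n < 0 then 'b' :: pyBinDigits (-n).toNat
  else if n = 0 then ['0']
  else pyBinDigits n.toNat

-- ===== PORT A =====
def treeA : List Int := [1, 3, 7, 15, 31, 63]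

-- the 'while probIdx < 51' table-building loop, as a fold over probIdx = 1..50
def treeProbA : List Int :=
  (List.foldl
    (fun (st : Nat × List Int) (probIdx : Nat) =>
      let treeIdx := if (PySem.List.pyGet? treeA (st.1 : Int)).getD 0 < (probIdx : Int) then st.1 + 1 else st.1
      (treeIdx, st.2.set probIdx ((PySem.List.pyGet? treeA (treeIdx : Int)).getD 0)))
    (0, List.replicate 51 (-1)) ((PySem.List.pyRange 1 51 1).map Int.toNat)).2

-- the 'while Queue' loop; fuel only makes the recursion total (never exhausted on Dom)
def bfsLoopA (s : List Char) : List (Int × Int × Bool) → Nat → Int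
  | [], _ => 1
  | _ :: _, 0 => 1
  | (root, length, zero) :: rest, fuel + 1 =>
    let c := (PySem.List.pyGet? s root).getD ' '
    if zero && (c == '1') then 0
    else
      let zero' := if c == '0' then true else zero
      if PySem.Int.mod root 2 = 1 then bfsLoopA s rest fuel
      else
        let length' := PySem.Int.floordiv length 2
        bfsLoopA s (rest ++ [(root - length, length', zero'), (root + length, length', zero')]) fuel

-- the body of A's 'for tc in range(testcase)' loop (answer[tc] := aOne numbers[tc])
def aOne (number : Int) : Int :=
  let num := pyBin number
  let len : Int := (num.length : Int)
  let size := (PySem.List.pyGet? treeProbA len).getD (-1)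
  let center := PySem.Int.floordiv size 2 + 1
  let num2 := 'b' :: (List.replicate (size - len).toNat '0' ++ num)
  if (PySem.List.pyGet? num2 center).getD ' ' == '0' then 0
  else bfsLoopA num2 [(center, PySem.Int.floordiv center 2, false)] 1000

def solution (numbers : List Int) : List Int := numbers.map aOne

-- ===== PORT B =====
-- 'size = 1; while size < len(s): size = 2*size+1'; fuel len+1 only makes it total (it
-- always suffices: size grows by at least 2 every step)
def bSize : Nat → Nat → Nat → Nat
  | 0, size, _ => size
  | fuel + 1, size, len => if size < len then bSize fuel (2 * size + 1) len else size

-- check(t): empty → True; t[mid]=='0' → '1' not in t; else recurse on the two halves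
def bCheck (t : List Char) : Bool :=
  if h : t.isEmpty then true
  else
    let mid := t.length / 2
    if (PySem.List.pyGet? t ((mid : Nat) : Int)).getD ' ' == '0' then !(t.contains '1')
    else bCheck (t.take mid) && bCheck (t.drop (mid + 1))
termination_by t.length
decreasing_by
  · simp only [List.length_take]
    have : t.length ≠ 0 := by simpa [List.isEmpty_iff_length_eq_zero] using h
    omega
  · have : t.length ≠ 0 := by simpa [List.isEmpty_iff_length_eq_zero] using h
    simp only [List.length_drop]
    omega

def bOne (number : Int) : Int :=
  let s := pyBin number
  let size := bSize (s.length + 1) 1 s.length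
  let t := List.replicate (size - s.length) '0' ++ s
  let mid := size / 2
  if (PySem.List.pyGet? t ((mid : Nat) : Int)).getD ' ' == '0' then 0
  else if bCheck (t.take mid) && bCheck (t.drop (mid + 1)) then 1 else 0

def solution_alt (numbers : List Int) : List Int := numbers.map bOne

-- ===== PRECONDITION & SPEC =====
def Spec_solution (numbers : List Int) (out : List Int) : Prop := out = solution_alt numbers
instance (numbers : List Int) (out : List Int) : Decidable (Spec_solution numbers out) := by unfold Spec_solution; infer_instance

-- ===== CLAIM (what is proved, stated in full; the proofs are below) =====
def Claim_equal_solution : Prop := ∀ (numbers : List Int), Dom_solution numbers → Spec_solution numbers (solution numbers)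

-- ===== LEMMAS AND PROOFS =====

-- chk t z: the common recursive validity of a (sub)tree string t under an already-seen-zero flag z
def chk (t : List Char) (z : Bool) : Bool :=
  if h : t.isEmpty then true
  else
    let mid := t.length / 2
    let c := (PySem.List.pyGet? t ((mid : Nat) : Int)).getD ' '
    if z && (c == '1') then false
    else
      let z' := if c == '0' then true else z
      chk (t.take mid) z' && chk (t.drop (mid + 1)) z'
termination_by t.length
decreasing_by
  · simp only [List.length_take]
    have : t.length ≠ 0 := by simpa [List.isEmpty_iff_length_eq_zero] using h
    omega
  · have : t.length ≠ 0 := by simpa [List.isEmpty_iff_length_eq_zero] using h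
    simp only [List.length_drop]
    omega

-- the queue element and window of s described by (window start a, level j, zero flag z)
def elemOf (a j : Nat) (z : Bool) : Int × Int × Bool :=
  ((a : Int) + 2 ^ j, ((2 ^ j / 2 : Nat) : Int), z)

def winOf (s : List Char) (a j : Nat) : List Char := (s.drop a).take (2 ^ (j + 1) - 1)

-- finite size facts: A's table lookup equals B's doubling loop, and the size is 2^k - 1
lemma sizeFacts : ∀ l : Nat, l < 34 → 1 ≤ l →
    (PySem.List.pyGet? treeProbA (l : Int)).getD (-1) = ((bSize (l + 1) 1 l : Nat) : Int) ∧
    l ≤ bSize (l + 1) 1 l ∧ bSize (l + 1) 1 l ≤ 63 ∧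
    ∃ k < 7, bSize (l + 1) 1 l + 1 = 2 ^ k := by
  decide

lemma pyBinDigits_len : ∀ k m : Nat, m < 2 ^ k → (pyBinDigits m).length ≤ k := by
  intro k
  induction k with
  | zero =>
    intro m hm
    have : m = 0 := by simpa using hm
    subst this
    rw [pyBinDigits]
    simp
  | succ k ih =>
    intro m hm
    by_cases h0 : m = 0
    · subst h0; rw [pyBinDigits]; simp
    · rw [pyBinDigits]
      simp only [h0, dif_neg, not_false_iff, List.length_append, List.length_cons,
        List.length_nil]
      have hdiv : m / 2 < 2 ^ k := by
        have h2 : (2:Nat) ^ (k+1) = 2 ^ k * 2 := by ring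
        omega
      have := ih (m / 2) hdiv
      omega

lemma pyBinDigits_pos (m : Nat) (hm : m ≠ 0) : 1 ≤ (pyBinDigits m).length := by
  rw [pyBinDigits]
  simp [hm]

lemma pyBin_len (n : Int) (h1 : -2147483648 ≤ n) (h2 : n ≤ 2147483648) :
    1 ≤ (pyBin n).length ∧ (pyBin n).length ≤ 33 := by
  unfold pyBin
  by_cases hneg : n < 0
  · simp only [hneg, if_pos, List.length_cons]
    have hlt : (-n).toNat < 2 ^ 32 := by
      have : (-n).toNat ≤ 2147483648 := by omega
      omega
    have := pyBinDigits_len 32 (-n).toNat hlt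
    omega
  · by_cases h0 : n = 0
    · simp [h0]
    · rw [if_neg hneg, if_neg h0]
      have hlt : n.toNat < 2 ^ 32 := by
        have : n.toNat ≤ 2147483648 := by omega
        omega
      have hle := pyBinDigits_len 32 n.toNat hlt
      have hpos := pyBinDigits_pos n.toNat (by omega)
      omega

lemma mem_split (t : List Char) (m : Nat) (hm : m < t.length) (c : Char) :
    c ∈ t ↔ (c ∈ t.take m ∨ t[m] = c ∨ c ∈ t.drop (m + 1)) := by
  have h : t.take m ++ t[m] :: t.drop (m + 1) = t := by
    rw [← List.drop_eq_getElem_cons hm, List.take_append_drop]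
  conv_lhs => rw [← h]
  simp only [List.mem_append, List.mem_cons]
  exact or_congr Iff.rfl (or_congr eq_comm Iff.rfl)

lemma chk_true (t : List Char) (hF : ∃ k, t.length + 1 = 2 ^ k) :
    chk t true = !(t.contains '1') := by
  rw [chk]
  by_cases hE : t.isEmpty
  · have : t = [] := List.isEmpty_iff.mp hE
    subst this
    simp
  · obtain ⟨k, hk⟩ := hF
    have hlen : t.length ≠ 0 := by simpa [List.isEmpty_iff_length_eq_zero] using hE
    have hkpos : 1 ≤ k := by
      by_contra hcon
      interval_cases k <;> omega
    have hp : (2:Nat) ^ k = 2 * 2 ^ (k - 1) := by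
      rw [← pow_succ']
      congr 1
      omega
    have hm : t.length / 2 < t.length := by omega
    have hc : (PySem.List.pyGet? t ((t.length / 2 : Nat) : Int)).getD ' ' = t[t.length / 2] := by
      rw [PySem.List.pyGet?_natCast, List.getElem?_eq_getElem hm]
      rfl
    have hFL : ∃ k', (t.take (t.length / 2)).length + 1 = 2 ^ k' := by
      refine ⟨k - 1, ?_⟩
      simp only [List.length_take]
      omega
    have hFR : ∃ k', (t.drop (t.length / 2 + 1)).length + 1 = 2 ^ k' := by
      refine ⟨k - 1, ?_⟩
      simp only [List.length_drop]
      omega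
    have ihL := chk_true (t.take (t.length / 2)) hFL
    have ihR := chk_true (t.drop (t.length / 2 + 1)) hFR
    have hsplit := mem_split t (t.length / 2) hm '1'
    simp only [hE, hc, List.contains_eq_mem]
    by_cases h1 : t[t.length / 2] = '1' <;>
      by_cases hL : ('1':Char) ∈ t.take (t.length / 2) <;>
        by_cases hR : ('1':Char) ∈ t.drop (t.length / 2 + 1) <;>
          simp [hsplit, h1, hL, hR, ihL, ihR]
termination_by t.length
decreasing_by
  · simp only [List.length_take]; omega
  · simp only [List.length_drop]; omega

lemma bCheck_eq_chk (t : List Char) (hF : ∃ k, t.length + 1 = 2 ^ k) :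
    bCheck t = chk t false := by
  rw [bCheck, chk]
  by_cases hE : t.isEmpty
  · simp [hE]
  · obtain ⟨k, hk⟩ := hF
    have hlen : t.length ≠ 0 := by simpa [List.isEmpty_iff_length_eq_zero] using hE
    have hkpos : 1 ≤ k := by
      by_contra hcon
      interval_cases k <;> omega
    have hp : (2:Nat) ^ k = 2 * 2 ^ (k - 1) := by
      rw [← pow_succ']
      congr 1
      omega
    have hm : t.length / 2 < t.length := by omega
    have hc : (PySem.List.pyGet? t ((t.length / 2 : Nat) : Int)).getD ' ' = t[t.length / 2] := by
      rw [PySem.List.pyGet?_natCast, List.getElem?_eq_getElem hm]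
      rfl
    have hc2 : (PySem.List.pyGet? t ((t.length : Int) / 2)).getD ' ' = t[t.length / 2] := by
      rw [show ((t.length : Int) / 2) = ((t.length / 2 : Nat) : Int) from by omega]
      exact hc
    have hFL : ∃ k', (t.take (t.length / 2)).length + 1 = 2 ^ k' := by
      refine ⟨k - 1, ?_⟩
      simp only [List.length_take]
      omega
    have hFR : ∃ k', (t.drop (t.length / 2 + 1)).length + 1 = 2 ^ k' := by
      refine ⟨k - 1, ?_⟩
      simp only [List.length_drop]
      omega
    have hsplit := mem_split t (t.length / 2) hm '1'
    by_cases hc0 : t[t.length / 2] = '0'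
    · have hne1 : t[t.length / 2] ≠ '1' := by simp [hc0]
      have h1 : ('1':Char) ∈ t ↔ ('1':Char) ∈ t.take (t.length / 2) ∨ ('1':Char) ∈ t.drop (t.length / 2 + 1) := by
        rw [hsplit]
        simp [hc0]
      simp only [hE, hc, hc0, List.contains_eq_mem]
      by_cases hL : ('1':Char) ∈ t.take (t.length / 2) <;>
        by_cases hR : ('1':Char) ∈ t.drop (t.length / 2 + 1) <;>
          simp [h1, hL, hR, hc2, chk_true _ hFL, chk_true _ hFR, List.contains_eq_mem]
    · have ihL := bCheck_eq_chk (t.take (t.length / 2)) hFL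
      have ihR := bCheck_eq_chk (t.drop (t.length / 2 + 1)) hFR
      simp [hE, hc, hc2, hc0, ihL, ihR]
termination_by t.length
decreasing_by
  · simp only [List.length_take]; omega
  · simp only [List.length_drop]; omega

-- chk on the empty list
lemma chk_nil (z : Bool) : chk [] z = true := by
  rw [chk]
  simp

-- one unfolding step of chk on a nonempty list
lemma chk_cons (t : List Char) (z : Bool) (hne : t.isEmpty = false) :
    chk t z =
      (if (z && ((PySem.List.pyGet? t ((t.length / 2 : Nat) : Int)).getD ' ' == '1')) = true then false
       else
         (chk (t.take (t.length / 2))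
            (if ((PySem.List.pyGet? t ((t.length / 2 : Nat) : Int)).getD ' ' == '0') = true then true else z) &&
          chk (t.drop (t.length / 2 + 1))
            (if ((PySem.List.pyGet? t ((t.length / 2 : Nat) : Int)).getD ' ' == '0') = true then true else z))) := by
  rw [chk]
  simp only [hne, Bool.false_eq_true, dite_false]

-- the BFS loop over any queue of well-shaped windows computes the conjunction of chk
lemma bfs_eq_chk (s : List Char) :
    ∀ (fuel : Nat) (ws : List (Nat × Nat × Bool)),
      (∀ w ∈ ws, 2 ∣ w.1 ∧ w.1 + 2 ^ (w.2.1 + 1) ≤ s.length + 1) →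
      (ws.map (fun w => 2 ^ (w.2.1 + 1) - 1)).sum ≤ fuel →
      bfsLoopA ('b' :: s) (ws.map (fun w => elemOf w.1 w.2.1 w.2.2)) fuel
        = if ws.all (fun w => chk (winOf s w.1 w.2.1) w.2.2) then 1 else 0 := by
  intro fuel
  induction fuel with
  | zero =>
    intro ws hws hfuel
    cases ws with
    | nil => simp [bfsLoopA]
    | cons w rest =>
      exfalso
      have h2 : 2 ≤ 2 ^ (w.2.1 + 1) := by
        calc (2:Nat) = 2 ^ 1 := rfl
        _ ≤ 2 ^ (w.2.1 + 1) := Nat.pow_le_pow_right (by norm_num) (by omega)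
      simp only [List.map_cons, List.sum_cons] at hfuel
      omega
  | succ fuel ih =>
    intro ws hws hfuel
    cases ws with
    | nil => simp [bfsLoopA]
    | cons w₀ rest =>
      obtain ⟨a, j, z⟩ := w₀
      obtain ⟨ha2', hbound'⟩ := hws _ List.mem_cons_self
      have ha2 : 2 ∣ a := ha2'
      have hbound : a + 2 ^ (j + 1) ≤ s.length + 1 := hbound'
      have hwsrest : ∀ w ∈ rest, 2 ∣ w.1 ∧ w.1 + 2 ^ (w.2.1 + 1) ≤ s.length + 1 :=
        fun w hw => hws w (List.mem_cons_of_mem _ hw)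
      have hpow : (2:Nat) ^ (j + 1) = 2 ^ j + 2 ^ j := by rw [pow_succ]; ring
      have hjpos : 1 ≤ 2 ^ j := Nat.one_le_two_pow
      have hidx : a + 2 ^ j - 1 < s.length := by omega
      -- the character A reads and the character chk reads are the same list entry
      have hcA : PySem.List.pyGet? ('b' :: s) ((a : Int) + 2 ^ j) = s[a + 2 ^ j - 1]? := by
        rw [show ((a : Int) + 2 ^ j) = ((a + 2 ^ j : Nat) : Int) from by push_cast; ring,
          PySem.List.pyGet?_natCast,
          show a + 2 ^ j = (a + 2 ^ j - 1) + 1 from by omega]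
        simp
      have hwlen : (winOf s a j).length = 2 ^ (j + 1) - 1 := by
        unfold winOf
        simp only [List.length_take, List.length_drop]
        omega
      have hwE : (winOf s a j).isEmpty = false := by
        rw [List.isEmpty_eq_false_iff_exists_mem]
        have : 0 < (winOf s a j).length := by omega
        exact ⟨_, List.getElem_mem this⟩
      have hmid : (winOf s a j).length / 2 = 2 ^ j - 1 := by omega
      have hcW : PySem.List.pyGet? (winOf s a j) (((winOf s a j).length / 2 : Nat) : Int)
          = s[a + 2 ^ j - 1]? := by
        rw [PySem.List.pyGet?_natCast, hmid]
        unfold winOf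
        rw [List.getElem?_take_of_lt (by omega), List.getElem?_drop]
        congr 1
        omega
      -- the two sides read the same queue head character
      simp only [List.map_cons, List.all_cons, elemOf, bfsLoopA, hcA]
      simp only [chk_cons _ _ hwE]
      simp only [hcW]
      by_cases hbad : (z && (s[a + 2 ^ j - 1]?.getD ' ' == '1')) = true
      · simp [hbad]
      · simp only [hbad, if_neg, Bool.false_eq_true, not_false_iff]
        by_cases hj : j = 0
        · subst hj
          -- leaf: the root index is odd, both sides just keep going
          have hmod : PySem.Int.mod ((a : Int) + 2 ^ 0) 2 = 1 := by
            rw [show ((a : Int) + 2 ^ 0) = ((a + 1 : Nat) : Int) from by push_cast; ring]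
            have hmc : PySem.Int.mod ((a + 1 : Nat) : Int) 2 = (((a + 1) % 2 : Nat) : Int) := by
              exact_mod_cast PySem.Int.mod_natCast (a + 1) 2
            rw [hmc]
            obtain ⟨q, hq⟩ := ha2
            omega
          rw [if_pos hmod]
          set z' := (if (s[a + 2 ^ 0 - 1]?.getD ' ' == '0') = true then true else z) with hz'
          have hchkL : chk ((winOf s a 0).take ((winOf s a 0).length / 2)) z' = true := by
            rw [show (winOf s a 0).length / 2 = 0 from by omega, List.take_zero]
            exact chk_nil _
          have hchkR : chk ((winOf s a 0).drop ((winOf s a 0).length / 2 + 1)) z' = true := by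
            rw [List.drop_of_length_le (by omega)]
            exact chk_nil _
          rw [hchkL, hchkR]
          simp only [Bool.and_true, Bool.true_and]
          apply ih rest hwsrest
          simp only [List.map_cons, List.sum_cons] at hfuel
          omega
        · -- internal node: the root index is even, both sides recurse into the two halves
          have hj1 : 1 ≤ j := by omega
          have hpowj : (2:Nat) ^ j = 2 ^ (j - 1) + 2 ^ (j - 1) := by
            have h : j - 1 + 1 = j := by omega
            conv_lhs => rw [← h]
            rw [pow_succ]
            ring
          have hmod : PySem.Int.mod ((a : Int) + 2 ^ j) 2 = 0 := by
            rw [show ((a : Int) + 2 ^ j) = ((a + 2 ^ j : Nat) : Int) from by push_cast; ring]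
            have hmc : PySem.Int.mod ((a + 2 ^ j : Nat) : Int) 2 = (((a + 2 ^ j) % 2 : Nat) : Int) := by
              exact_mod_cast PySem.Int.mod_natCast (a + 2 ^ j) 2
            rw [hmc]
            obtain ⟨q, hq⟩ := ha2
            have : (a + 2 ^ j) % 2 = 0 := by omega
            rw [this]
            rfl
          rw [if_neg (by rw [hmod]; norm_num)]
          have hlen2 : ((2 ^ j / 2 : Nat) : Int) = ((2 ^ (j - 1) : Nat) : Int) := by
            congr 1
            omega
          have hfd : PySem.Int.floordiv ((2 ^ j / 2 : Nat) : Int) 2 = ((2 ^ (j - 1) / 2 : Nat) : Int) := by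
            rw [hlen2]
            exact_mod_cast PySem.Int.floordiv_natCast (2 ^ (j - 1)) 2
          set z' := (if (s[a + 2 ^ j - 1]?.getD ' ' == '0') = true then true else z) with hz'
          have hmapeq :
              (rest.map (fun w => ((w.1 : Int) + 2 ^ w.2.1, ((2 ^ w.2.1 / 2 : Nat) : Int), w.2.2))) ++
                [((a : Int) + 2 ^ j - ((2 ^ j / 2 : Nat) : Int), ((2 ^ (j - 1) / 2 : Nat) : Int), z'),
                 ((a : Int) + 2 ^ j + ((2 ^ j / 2 : Nat) : Int), ((2 ^ (j - 1) / 2 : Nat) : Int), z')]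
              = ((rest ++ [(a, j - 1, z'), (a + 2 ^ j, j - 1, z')]).map
                  (fun w => elemOf w.1 w.2.1 w.2.2)) := by
            rw [List.map_append]
            refine congrArg₂ (· ++ ·) rfl ?_
            simp only [List.map_cons, List.map_nil, elemOf]
            have hIP : (2 : Int) ^ j = ((2 ^ j : Nat) : Int) := by push_cast; ring
            have hIP1 : (2 : Int) ^ (j - 1) = ((2 ^ (j - 1) : Nat) : Int) := by push_cast; ring
            have e1 : (a : Int) + 2 ^ j - ((2 ^ j / 2 : Nat) : Int) = (a : Int) + 2 ^ (j - 1) := by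
              rw [hIP, hIP1]
              omega
            have e2 : (a : Int) + 2 ^ j + ((2 ^ j / 2 : Nat) : Int)
                = ((a + 2 ^ j : Nat) : Int) + 2 ^ (j - 1) := by
              rw [hIP, hIP1]
              omega
            rw [e2, e1]
          rw [hfd, hmapeq, ih (rest ++ [(a, j - 1, z'), (a + 2 ^ j, j - 1, z')]) ?_ ?_]
          · -- both sides are the same conjunction of chk over windows
            have hwl : (winOf s a j).take ((winOf s a j).length / 2) = winOf s a (j - 1) := by
              rw [hmid]
              unfold winOf
              rw [List.take_take]
              congr 1
              omega
            have hwr : (winOf s a j).drop ((winOf s a j).length / 2 + 1) = winOf s (a + 2 ^ j) (j - 1) := by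
              rw [hmid]
              unfold winOf
              rw [List.drop_take, List.drop_drop]
              congr 1
              · omega
              · congr 1
                omega
            rw [hwl, hwr]
            simp only [List.all_append, List.all_cons, List.all_nil]
            cases rest.all (fun w => chk (winOf s w.1 w.2.1) w.2.2) <;>
              cases chk (winOf s a (j - 1)) z' <;>
                cases chk (winOf s (a + 2 ^ j) (j - 1)) z' <;> simp
          · -- the children windows are well-shaped
            intro w hw
            rcases List.mem_append.mp hw with hw | hw
            · exact hwsrest w hw
            · simp only [List.mem_cons, List.not_mem_nil, or_false] at hw
              rcases hw with rfl | rfl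
              · refine ⟨ha2, ?_⟩
                show a + 2 ^ ((j - 1) + 1) ≤ s.length + 1
                omega
              · refine ⟨?_, ?_⟩
                · show 2 ∣ (a + 2 ^ j)
                  omega
                · show (a + 2 ^ j) + 2 ^ ((j - 1) + 1) ≤ s.length + 1
                  omega
          · -- fuel accounting: one pop pays for both children exactly
            simp only [List.map_cons, List.sum_cons] at hfuel
            simp only [List.map_append, List.sum_append, List.map_cons, List.sum_cons,
              List.map_nil, List.sum_nil]
            omega

lemma aOne_eq_bOne (n : Int) (h1 : -2147483648 ≤ n) (h2 : n ≤ 2147483648) :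
    aOne n = bOne n := by
  obtain ⟨hl1, hl2⟩ := pyBin_len n h1 h2
  obtain ⟨hsizeEq, hlle, hle63, k, hk7, hkpow⟩ := sizeFacts (pyBin n).length (by omega) hl1
  simp only [aOne, bOne, hsizeEq]
  set l := (pyBin n).length with hl
  set sz := bSize (l + 1) 1 l with hsz
  have hszpos : 1 ≤ sz := le_trans hl1 hlle
  have hkpos : 1 ≤ k := by
    by_contra hcon
    interval_cases k <;> omega
  have hj : k - 1 + 1 = k := by omega
  have hpk : (2 : Nat) ^ k = 2 ^ (k - 1) + 2 ^ (k - 1) := by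
    conv_lhs => rw [← hj]
    rw [pow_succ]
    ring
  have hrep : ((sz : Int) - (l : Int)).toNat = sz - l := by omega
  rw [hrep]
  set t := List.replicate (sz - l) '0' ++ pyBin n with ht
  have htlen : t.length = sz := by
    rw [ht]
    simp only [List.length_append, List.length_replicate, ← hl]
    omega
  have htE : t.isEmpty = false := by
    rw [List.isEmpty_eq_false_iff_exists_mem]
    have : 0 < t.length := by omega
    exact ⟨_, List.getElem_mem this⟩
  have hfdsz : PySem.Int.floordiv ((sz : Nat) : Int) 2 = ((sz / 2 : Nat) : Int) := by
    exact_mod_cast PySem.Int.floordiv_natCast sz 2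
  have hcenter : PySem.Int.floordiv ((sz : Nat) : Int) 2 + 1 = ((sz / 2 + 1 : Nat) : Int) := by
    rw [hfdsz]
    push_cast
    ring
  rw [hcenter]
  have hA_char : PySem.List.pyGet? ('b' :: t) ((sz / 2 + 1 : Nat) : Int) = t[sz / 2]? := by
    rw [PySem.List.pyGet?_natCast]
    exact List.getElem?_cons_succ
  have hB_char : PySem.List.pyGet? t ((sz / 2 : Nat) : Int) = t[sz / 2]? :=
    PySem.List.pyGet?_natCast t (sz / 2)
  rw [hA_char, hB_char]
  by_cases hc0 : (t[sz / 2]?.getD ' ' == '0') = true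
  · simp [hc0]
  · simp only [hc0, Bool.false_eq_true, if_false]
    -- A's initial queue element is the whole-string window (a = 0, j = k - 1)
    have hszhalf : sz / 2 + 1 = 2 ^ (k - 1) := by omega
    have hIP : ((2 ^ (k - 1) : Nat) : Int) = (2 : Int) ^ (k - 1) := by push_cast; ring
    have hinit : [(((sz / 2 + 1 : Nat) : Int), PySem.Int.floordiv ((sz / 2 + 1 : Nat) : Int) 2, false)]
        = [((0 : Nat), k - 1, false)].map (fun w => elemOf w.1 w.2.1 w.2.2) := by
      simp only [List.map_cons, List.map_nil, elemOf, Nat.cast_zero, zero_add]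
      have e1 : ((sz / 2 + 1 : Nat) : Int) = (2 : Int) ^ (k - 1) := by
        rw [hszhalf, hIP]
      have e2 : PySem.Int.floordiv ((sz / 2 + 1 : Nat) : Int) 2 = ((2 ^ (k - 1) / 2 : Nat) : Int) := by
        rw [show ((sz / 2 + 1 : Nat) : Int) = ((2 ^ (k - 1) : Nat) : Int) from by rw [hszhalf]]
        exact_mod_cast PySem.Int.floordiv_natCast (2 ^ (k - 1)) 2
      rw [e2, e1]
    rw [hinit, bfs_eq_chk t 1000 [((0 : Nat), k - 1, false)] ?_ ?_]
    · have hwin : winOf t 0 (k - 1) = t := by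
        unfold winOf
        rw [List.drop_zero]
        apply List.take_of_length_le
        rw [htlen, hj]
        omega
      simp only [List.all_cons, List.all_nil, Bool.and_true, hwin]
      rw [chk_cons t false htE]
      simp only [htlen, hB_char, hc0, Bool.false_eq_true, if_false, Bool.false_and]
      have hfullL : ∃ k', (t.take (sz / 2)).length + 1 = 2 ^ k' := by
        refine ⟨k - 1, ?_⟩
        simp only [List.length_take, htlen]
        omega
      have hfullR : ∃ k', (t.drop (sz / 2 + 1)).length + 1 = 2 ^ k' := by
        refine ⟨k - 1, ?_⟩
        simp only [List.length_drop, htlen]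
        omega
      rw [bCheck_eq_chk _ hfullL, bCheck_eq_chk _ hfullR]
    · intro w hw
      simp only [List.mem_cons, List.not_mem_nil, or_false] at hw
      subst hw
      refine ⟨Dvd.intro 0 rfl, ?_⟩
      show 0 + 2 ^ ((k - 1) + 1) ≤ t.length + 1
      rw [hj, htlen]
      omega
    · simp only [List.map_cons, List.map_nil, List.sum_cons, List.sum_nil]
      show 2 ^ ((k - 1) + 1) - 1 + 0 ≤ 1000
      rw [hj]
      omega

-- ===== VERDICT (by name: the statement is the Claim_ definition above) =====
theorem solution_spec : Claim_equal_solution := by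
  intro numbers hDom
  unfold Spec_solution solution solution_alt
  apply List.map_congr_left
  intro n hn
  have hb : pvDomInt n = true := by
    have := (List.all_eq_true.mp hDom) n hn
    simpa using this
  have hb' := of_decide_eq_true hb
  exact aOne_eq_bOne n hb'.1 hb'.2
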